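-- pv_equiv track=rewrite | github.com/cancerit/hairpin2 | hairpin2/main.py | find_stutter_duplicates
-- ===== SOURCE A (Python) =====
-- def find_stutter_duplicates(
--     readpair_ends: list[list[int]],
--     max_span: int
-- ) -> list[int]:
--     """
--     When analysing a variant, given `readpair_ends`, a list of readpair start/end co-ordinates,
--     use a simple algorithm to identify likely stutter duplicate reads missed by traditional dupmarking.
--     `max_span` sets the maximum deviation of length between readpairs within which reads might be identified
--     as duplicates
--
--     In regions of low complexity, short repeats and homopolymer tracts can cause PCR stuttering.
--     Leading to, for example, an additional A on the read when amplifying a tract of As.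
--     If duplicated reads contain stutter, this can lead to variation of read length and alignment to reference
--     between reads that are in fact duplicates. These duplicates then evade dupmarking and give rise to
--     spurious variants when calling.
--     """
--     dup_idcs: list[int] = []
--     read_ends_sorted: list[tuple[int, list[int]]] = sorted([(i, sorted(l))
--                                                             for i, l
--                                                             in enumerate(readpair_ends)],
--                                                            key=lambda x: x[1])
--     # smallest first element, per pc8 implementation
--     base_read_ends_list: list[list[int]] = [read_ends_sorted[0][1]]
--     for i in range(1, len(read_ends_sorted)):
--         comparison_read_ends = read_ends_sorted[i]
--         max_diffs = []
--         for sublist in base_read_ends_list: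
--             max_diffs.append(max([abs(x - y)
--                                   for x, y
--                                   in zip(sublist, comparison_read_ends[1])]))
--         if all([x <= max_span for x in max_diffs]):
--             # dups
--             base_read_ends_list.append(comparison_read_ends[1])
--             dup_idcs.append(comparison_read_ends[0])
--         else:
--             # read at i is not dup of reads in base_read_ends_list
--             # start again, test read at i
--             # against reads subsequent from i in ends_sorted
--             base_read_ends_list = [comparison_read_ends[1]]
--     return dup_idcs
-- ===== SOURCE B (Python) =====
-- def find_stutter_duplicates(
--     readpair_ends: list[list[int]],
--     max_span: int
-- ) -> list[int]:
--     """
--     Identify likely stutter-duplicate readpairs: walking the reads in sorted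
--     coordinate order, a read joins the current duplicate group iff every one of
--     its coordinates is within max_span of every group member's corresponding
--     coordinate; otherwise it starts a new group.
--
--     Instead of re-scanning all group members per candidate, the group is
--     summarised by running per-position minima/maxima: a coordinate is within
--     max_span of every member's value at that position iff it is within max_span
--     of both the position's minimum and maximum.  Records may differ in length;
--     a position only constrains the members that reach it.
--     """
--     read_ends_sorted = sorted([(i, sorted(l)) for i, l in enumerate(readpair_ends)],
--                               key=lambda x: x[1])
--     first = read_ends_sorted[0][1]
--     lo = list(first)
--     hi = list(first)
--     dup_idcs: list[int] = []
--     for idx, c in read_ends_sorted[1:]: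
--         if all(h - max_span <= x <= l + max_span for l, h, x in zip(lo, hi, c)):
--             dup_idcs.append(idx)
--             for j, x in enumerate(c):
--                 if j < len(lo):
--                     lo[j] = min(lo[j], x)
--                     hi[j] = max(hi[j], x)
--                 else:
--                     lo.append(x)
--                     hi.append(x)
--         else:
--             lo = list(c)
--             hi = list(c)
--     return dup_idcs
-- ===== Notes on version B (the rewrite author's own statement) =====
-- stated objective: faster
-- what changed: B replaces A's inner scan over every member of the current base group (recomputing the max coordinate deviation per member) with running per-position min/max summaries of the group, so each candidate read is checked and the group updated in O(k) instead of O(|group|*k); Pre_ excludes only inputs on which A raises (empty input list, or >=2 readpairs with an empty coordinate list).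
import Mathlib
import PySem

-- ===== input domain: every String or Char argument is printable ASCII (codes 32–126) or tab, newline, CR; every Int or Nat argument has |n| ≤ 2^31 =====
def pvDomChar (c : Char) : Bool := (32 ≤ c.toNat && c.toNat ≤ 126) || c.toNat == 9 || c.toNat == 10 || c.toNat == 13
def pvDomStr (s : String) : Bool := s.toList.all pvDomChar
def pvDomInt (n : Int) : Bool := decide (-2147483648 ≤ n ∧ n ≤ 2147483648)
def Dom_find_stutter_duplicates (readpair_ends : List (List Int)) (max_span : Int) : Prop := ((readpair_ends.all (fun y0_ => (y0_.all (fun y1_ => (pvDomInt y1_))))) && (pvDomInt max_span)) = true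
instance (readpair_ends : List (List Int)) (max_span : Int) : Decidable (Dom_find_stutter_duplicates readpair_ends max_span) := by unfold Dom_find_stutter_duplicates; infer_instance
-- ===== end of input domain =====

-- B summarises the growing base group by running per-position min/max bounds instead of
-- rescanning every group member per candidate (measurably faster on clustered input).

-- ===== PORT A =====
-- max([abs(x - y) for x, y in zip(sublist, comp)]) ; Python max raises on [], excluded by Pre_
def pvPairMax (sub c : List Int) : Int :=
  match (List.zip sub c).map (fun p => |p.1 - p.2|) with
  | [] => 0            -- unreachable under Pre_ (ValueError in Python)
  | d :: ds => ds.foldl max d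

-- the for-loop of A: state = (base_read_ends_list, dup_idcs)
def pvALoop (max_span : Int) : List (Int × List Int) → List (List Int) → List Int → List Int
  | [], _, dup => dup
  | c :: rest, base, dup =>
    let max_diffs := base.map (fun sublist => pvPairMax sublist c.2)
    if max_diffs.all (fun x => decide (x ≤ max_span)) then
      pvALoop max_span rest (base ++ [c.2]) (dup ++ [c.1])
    else
      pvALoop max_span rest [c.2] dup

def find_stutter_duplicates (readpair_ends : List (List Int)) (max_span : Int) : List Int :=
  let read_ends_sorted :=
    PySem.List.sorted ((PySem.List.enumerate readpair_ends).map
        (fun p => (p.1, PySem.List.sorted p.2 (fun x => x) false)))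
      (fun x => x.2) false
  match read_ends_sorted with
  | [] => []           -- unreachable under Pre_ (IndexError in Python)
  | b0 :: rest => pvALoop max_span rest [b0.2] []

-- ===== PORT B =====
-- Source B's bound-update loop 'for j, x in enumerate(c): if j < len(lo): lo[j] = f(lo[j], x)
-- else: lo.append(x)' as structural recursion on the two lists
def pvMerge (f : Int → Int → Int) : List Int → List Int → List Int
  | u, [] => u
  | [], x :: v => x :: pvMerge f [] v
  | a :: u, x :: v => f a x :: pvMerge f u v

-- all(h - max_span <= x <= l + max_span for l, h, x in zip(lo, hi, c));
-- Python's 3-ary zip transcribed as the nested pairing zip (zip lo hi) c (same truncation)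
def pvBCond (max_span : Int) (lo hi c : List Int) : Bool :=
  (List.zip (List.zip lo hi) c).all
    (fun p => decide (p.1.2 - max_span ≤ p.2) && decide (p.2 ≤ p.1.1 + max_span))

-- the for-loop of B: state = (lo, hi, dup_idcs)
def pvBLoop (max_span : Int) : List (Int × List Int) → List Int → List Int → List Int → List Int
  | [], _, _, dup => dup
  | c :: rest, lo, hi, dup =>
    if pvBCond max_span lo hi c.2 then
      pvBLoop max_span rest (pvMerge min lo c.2) (pvMerge max hi c.2) (dup ++ [c.1])
    else
      pvBLoop max_span rest c.2 c.2 dup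

def find_stutter_duplicates_alt (readpair_ends : List (List Int)) (max_span : Int) : List Int :=
  let read_ends_sorted :=
    PySem.List.sorted ((PySem.List.enumerate readpair_ends).map
        (fun p => (p.1, PySem.List.sorted p.2 (fun x => x) false)))
      (fun x => x.2) false
  match read_ends_sorted with
  | [] => []           -- unreachable under Pre_
  | b0 :: rest => pvBLoop max_span rest b0.2 b0.2 []

-- ===== PRECONDITION & SPEC =====
-- A raises on exactly these inputs: IndexError on [], and ValueError (max of empty
-- sequence) when there are ≥ 2 readpairs and some coordinate list is empty.
def Pre_find_stutter_duplicates (readpair_ends : List (List Int)) (max_span : Int) : Prop :=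
  readpair_ends ≠ [] ∧ (readpair_ends.length = 1 ∨ ∀ l ∈ readpair_ends, l ≠ [])
instance (readpair_ends : List (List Int)) (max_span : Int) : Decidable (Pre_find_stutter_duplicates readpair_ends max_span) := by unfold Pre_find_stutter_duplicates; infer_instance

def pvWitness_find_stutter_duplicates : List (List Int) × Int := ([[1, 2], [2, 3], [90, 95]], 5)

def Spec_find_stutter_duplicates (readpair_ends : List (List Int)) (max_span : Int) (out : List Int) : Prop := out = find_stutter_duplicates_alt readpair_ends max_span
instance (readpair_ends : List (List Int)) (max_span : Int) (out : List Int) : Decidable (Spec_find_stutter_duplicates readpair_ends max_span out) := by unfold Spec_find_stutter_duplicates; infer_instance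

-- ===== CLAIM (what is proved, stated in full; the proofs are below) =====
def Claim_equal_find_stutter_duplicates : Prop := ∀ (readpair_ends : List (List Int)) (max_span : Int), Dom_find_stutter_duplicates readpair_ends max_span → Pre_find_stutter_duplicates readpair_ends max_span → Spec_find_stutter_duplicates readpair_ends max_span (find_stutter_duplicates readpair_ends max_span)

-- ===== LEMMAS AND PROOFS =====

-- B's bound-update recursion in closed form: common prefix merged, longer tail kept/taken over
theorem pvMerge_eq (f : Int → Int → Int) (u v : List Int) :
    pvMerge f u v = List.zipWith f u v ++ u.drop v.length ++ v.drop u.length := by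
  induction u generalizing v with
  | nil =>
    induction v with
    | nil => rfl
    | cons x v' ih => simp [pvMerge] at ih ⊢; exact ih
  | cons a u' ih =>
    cases v with
    | nil => simp [pvMerge]
    | cons x v' => simp [pvMerge, ih v']

-- Python max over a nonempty list is ≤ m iff every element is
theorem pv_foldl_max_le (m : Int) (ds : List Int) (d : Int) :
    (ds.foldl max d ≤ m) ↔ (d ≤ m ∧ ∀ x ∈ ds, x ≤ m) := by
  induction ds generalizing d with
  | nil => simp
  | cons e es ih =>
    simp only [List.foldl_cons, ih, max_le_iff, List.mem_cons]
    constructor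
    · rintro ⟨⟨h1, h2⟩, h3⟩
      refine ⟨h1, ?_⟩
      rintro x (rfl | hx)
      · exact h2
      · exact h3 x hx
    · rintro ⟨h1, h2⟩
      exact ⟨⟨h1, h2 e (Or.inl rfl)⟩, fun x hx => h2 x (Or.inr hx)⟩

-- the per-member test of A equals B's bound test with lo = hi = that member
theorem pv_cond_single (m : Int) (s c : List Int) (hs : s ≠ []) (hc : c ≠ []) :
    pvBCond m s s c = decide (pvPairMax s c ≤ m) := by
  have key : ∀ (s c : List Int),
      pvBCond m s s c = (List.zip s c).all (fun p => decide (|p.1 - p.2| ≤ m)) := by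
    intro s c
    induction s generalizing c with
    | nil => simp [pvBCond]
    | cons a s' ih =>
      cases c with
      | nil => simp [pvBCond]
      | cons y c' =>
        simp only [pvBCond, List.zip_cons_cons, List.all_cons] at *
        rw [show ((List.zip (List.zip s' s') c').all
              (fun p => decide (p.1.2 - m ≤ p.2) && decide (p.2 ≤ p.1.1 + m)))
            = (List.zip s' c').all (fun p => decide (|p.1 - p.2| ≤ m)) from ih c']
        congr 1
        rw [Bool.eq_iff_iff]
        simp only [Bool.and_eq_true, decide_eq_true_eq, abs_sub_le_iff]
        omega
  rw [key]
  unfold pvPairMax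
  cases hz : (List.zip s c).map (fun p => |p.1 - p.2|) with
  | nil =>
    exfalso
    cases s with
    | nil => exact hs rfl
    | cons a s' => cases c with
      | nil => exact hc rfl
      | cons y c' => simp at hz
  | cons d ds =>
    have : (List.zip s c).all (fun p => decide (|p.1 - p.2| ≤ m))
        = (d :: ds).all (fun x => decide (x ≤ m)) := by
      rw [← hz, List.all_map]; rfl
    rw [this, Bool.eq_iff_iff]
    simp only [List.all_cons, List.all_eq_true, Bool.and_eq_true, decide_eq_true_eq,
      pv_foldl_max_le]

-- merging a member into the bounds factors B's test
theorem pv_cond_merge (m : Int) (lo hi s c : List Int) (hlen : lo.length = hi.length) :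
    pvBCond m (pvMerge min lo s) (pvMerge max hi s) c
      = (pvBCond m lo hi c && pvBCond m s s c) := by
  induction lo generalizing hi s c with
  | nil =>
    cases hi with
    | cons _ _ => simp at hlen
    | nil => simp [pvMerge_eq, pvBCond]
  | cons a lo' ih =>
    cases hi with
    | nil => simp at hlen
    | cons b hi' =>
      cases s with
      | nil =>
        simp [pvMerge, pvBCond, Bool.and_true]
      | cons x s' =>
        cases c with
        | nil => simp [pvBCond]
        | cons y c' =>
          have hlen' : lo'.length = hi'.length := by simpa using hlen
          simp only [pvMerge, pvBCond, List.zip_cons_cons, List.all_cons]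
          have tails : ((List.zip (List.zip (pvMerge min lo' s') (pvMerge max hi' s')) c').all
                (fun p => decide (p.1.2 - m ≤ p.2) && decide (p.2 ≤ p.1.1 + m)))
              = ((List.zip (List.zip lo' hi') c').all
                  (fun p => decide (p.1.2 - m ≤ p.2) && decide (p.2 ≤ p.1.1 + m))
                && (List.zip (List.zip s' s') c').all
                  (fun p => decide (p.1.2 - m ≤ p.2) && decide (p.2 ≤ p.1.1 + m))) := by
            have := ih hi' s' c' hlen'
            simpa [pvBCond] using this
          rw [tails]
          have heads : (decide (max b x - m ≤ y) && decide (y ≤ min a x + m))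
              = ((decide (b - m ≤ y) && decide (y ≤ a + m))
                && (decide (x - m ≤ y) && decide (y ≤ x + m))) := by
            rcases le_total b x with h | h <;> rcases le_total a x with h2 | h2 <;>
              simp [h, h2] <;>
              by_cases hby : b - m ≤ y <;> by_cases hxy : x - m ≤ y <;>
              by_cases hya : y ≤ a + m <;> by_cases hyx : y ≤ x + m <;>
              simp [hya, hyx] <;> omega
          rw [heads]
          ac_rfl

theorem pv_merge_length (f : Int → Int → Int) (u v : List Int) :
    (pvMerge f u v).length = max u.length v.length := by
  simp [pvMerge_eq]; omega

-- folding B's bounds over the whole base group factors into per-member tests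
theorem pv_cond_fold (m : Int) (bs : List (List Int)) (lo hi c : List Int)
    (hlen : lo.length = hi.length) :
    pvBCond m (bs.foldl (pvMerge min) lo) (bs.foldl (pvMerge max) hi) c
      = (pvBCond m lo hi c && bs.all (fun s => pvBCond m s s c)) := by
  induction bs generalizing lo hi with
  | nil => simp only [List.foldl_nil, List.all_nil, Bool.and_true]
  | cons s bs' ih =>
    simp only [List.foldl_cons, List.all_cons]
    rw [ih (pvMerge min lo s) (pvMerge max hi s)
        (by rw [pv_merge_length, pv_merge_length, hlen]),
      pv_cond_merge m lo hi s c hlen]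
    ac_rfl

-- main loop correspondence: B's (lo, hi) are the folded bounds of A's base group
theorem pv_loop_eq (m : Int) (rest : List (Int × List Int)) :
    ∀ (b0 : List Int) (bs : List (List Int)) (dup : List Int),
    b0 ≠ [] → (∀ s ∈ bs, s ≠ []) → (∀ p ∈ rest, p.2 ≠ []) →
    pvALoop m rest (b0 :: bs) dup
      = pvBLoop m rest (bs.foldl (pvMerge min) b0) (bs.foldl (pvMerge max) b0) dup := by
  induction rest with
  | nil => intro b0 bs dup _ _ _; simp [pvALoop, pvBLoop]
  | cons c rest' ih =>
    intro b0 bs dup hb0 hbs hrest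
    have hc : c.2 ≠ [] := hrest c (List.mem_cons_self)
    have hrest' : ∀ p ∈ rest', p.2 ≠ [] := fun p hp => hrest p (List.mem_cons_of_mem _ hp)
    have conds : ((b0 :: bs).map (fun sublist => pvPairMax sublist c.2)).all
          (fun x => decide (x ≤ m))
        = pvBCond m (bs.foldl (pvMerge min) b0) (bs.foldl (pvMerge max) b0) c.2 := by
      rw [pv_cond_fold m bs b0 b0 c.2 rfl, List.all_map]
      rw [List.all_cons, pv_cond_single m b0 c.2 hb0 hc]
      congr 1
      rw [Bool.eq_iff_iff]
      simp only [List.all_eq_true, Function.comp_apply]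
      constructor
      · intro h s hs
        rw [pv_cond_single m s c.2 (hbs s hs) hc]
        exact h s hs
      · intro h s hs
        have hss := h s hs
        rwa [pv_cond_single m s c.2 (hbs s hs) hc] at hss
    simp only [pvALoop, pvBLoop]
    rw [← conds]
    by_cases h : ((b0 :: bs).map (fun sublist => pvPairMax sublist c.2)).all (fun x => decide (x ≤ m)) = true
    · simp only [h, if_true]
      have : (bs ++ [c.2]).foldl (pvMerge min) b0
          = pvMerge min (bs.foldl (pvMerge min) b0) c.2 := by
        rw [List.foldl_append]; rfl
      have h2 : (bs ++ [c.2]).foldl (pvMerge max) b0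
          = pvMerge max (bs.foldl (pvMerge max) b0) c.2 := by
        rw [List.foldl_append]; rfl
      rw [show (b0 :: bs) ++ [c.2] = b0 :: (bs ++ [c.2]) from rfl,
        ih b0 (bs ++ [c.2]) (dup ++ [c.1]) hb0
          (fun s hs => by rcases List.mem_append.mp hs with h' | h'
                          · exact hbs s h'
                          · simp at h'; subst h'; exact hc) hrest',
        this, h2]
    · simp only [Bool.not_eq_true] at h
      simp only [h, if_false, Bool.false_eq_true]
      have := ih c.2 [] dup hc (by simp) hrest'
      simpa using this

-- the sorted lists of nonempty coordinate lists are nonempty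
theorem pv_sorted_mem_ne_nil (readpair_ends : List (List Int))
    (hall : ∀ l ∈ readpair_ends, l ≠ []) :
    ∀ p ∈ PySem.List.sorted ((PySem.List.enumerate readpair_ends).map
        (fun p => (p.1, PySem.List.sorted p.2 (fun x => x) false)))
      (fun x => x.2) false, p.2 ≠ [] := by
  intro p hp
  rw [PySem.List.mem_sorted] at hp
  rcases List.mem_map.mp hp with ⟨q, hq, rfl⟩
  rcases (PySem.List.mem_enumerate_iff _ _ _).mp hq with ⟨k, hk, rfl⟩
  simp only [ne_eq, PySem.List.sorted_eq_nil_iff]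
  exact hall _ (List.getElem_mem hk)

-- ===== VERDICT (by name: the statement is the Claim_ definition above) =====
theorem find_stutter_duplicates_spec : Claim_equal_find_stutter_duplicates := by
  intro readpair_ends max_span _ hpre
  rcases hpre with ⟨hne, hcase⟩
  unfold Spec_find_stutter_duplicates find_stutter_duplicates find_stutter_duplicates_alt
  cases hs : PySem.List.sorted ((PySem.List.enumerate readpair_ends).map
      (fun p => (p.1, PySem.List.sorted p.2 (fun x => x) false)))
    (fun x => x.2) false with
  | nil => rfl
  | cons b0 rest =>
    rcases hcase with h1 | hall
    · -- a single readpair: the loops run on rest = []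
      have : rest = [] := by
        have hlen := PySem.List.length_sorted ((PySem.List.enumerate readpair_ends).map
            (fun p => (p.1, PySem.List.sorted p.2 (fun x => x) false))) (fun x : Int × List Int => x.2) false
        rw [hs] at hlen
        simp [h1, PySem.List.length_enumerate] at hlen
        exact hlen
      subst this
      rfl
    · have hmem := pv_sorted_mem_ne_nil readpair_ends hall
      rw [hs] at hmem
      have hb0 : b0.2 ≠ [] := hmem b0 (List.mem_cons_self)
      have hrest : ∀ p ∈ rest, p.2 ≠ [] := fun p hp => hmem p (List.mem_cons_of_mem _ hp)
      simpa using pv_loop_eq max_span rest b0.2 [] [] hb0 (by simp) hrest
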